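-- pv_equiv track=rewrite | github.com/meraf00/Competitive-Programming | 0036-valid-sudoku/0036-valid-sudoku.py | findDuplicateIn3x3
-- ===== SOURCE A (Python) =====
-- def findDuplicateIn3x3(board, row_begin, col_begin):
--     nums = set()
--     for row_idx in range(row_begin, row_begin + 3):
--         for col_idx in range(col_begin, col_begin + 3):
--             num = board[row_idx][col_idx]
--
--             if num == ".":
--                 continue
--
--             if num in nums:
--                 return True
--             nums.add(num)
--
--     return False
-- ===== SOURCE B (Python) =====
-- def findDuplicateIn3x3(board, row_begin, col_begin):
--     cells = [board[row_begin + r][col_begin + c]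
--              for r in range(3) for c in range(3)]
--
--     def has_pair(rest):
--         if not rest:
--             return False
--         head, tail = rest[0], rest[1:]
--         return (head != "." and head in tail) or has_pair(tail)
--
--     return has_pair(cells)
-- ===== Notes on version B (the rewrite author's own statement) =====
-- stated objective: alternative
-- what changed: Replaces A's incremental seen-set scan with early return by collecting the 9 cells and deciding via recursive pairwise brute force: each head value is compared against the remaining tail, with no set at all.
-- outside the precondition, e.g. on findDuplicateIn3x3([['1', '1', '.']], 0, 0): A returns True, B raises IndexError
import Mathlib
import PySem

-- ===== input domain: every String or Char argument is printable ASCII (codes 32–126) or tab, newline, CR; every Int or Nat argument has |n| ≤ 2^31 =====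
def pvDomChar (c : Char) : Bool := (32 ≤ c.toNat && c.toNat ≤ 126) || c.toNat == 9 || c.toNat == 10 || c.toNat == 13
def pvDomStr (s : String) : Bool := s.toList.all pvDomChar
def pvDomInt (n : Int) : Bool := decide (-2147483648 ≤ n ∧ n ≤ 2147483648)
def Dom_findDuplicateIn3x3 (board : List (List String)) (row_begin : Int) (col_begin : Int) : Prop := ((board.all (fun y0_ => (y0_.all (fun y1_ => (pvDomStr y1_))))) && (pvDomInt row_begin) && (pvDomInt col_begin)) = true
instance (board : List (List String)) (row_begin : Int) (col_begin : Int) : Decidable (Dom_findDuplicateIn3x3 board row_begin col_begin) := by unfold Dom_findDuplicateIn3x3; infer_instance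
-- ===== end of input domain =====

-- B replaces A's incremental seen-set scan with early return by collecting the 9 block cells
-- and a recursive pairwise brute-force check (head compared against the tail, no set); objective: alternative.

-- ===== PORT A =====
-- loop body of A: current state (early-return flag, nums set), one cell value (none = IndexError, unreachable under Pre_)
def pvStepA (st : Bool × PySem.Set String) (o : Option String) : Bool × PySem.Set String :=
  if st.1 then st   -- Python already returned True: rest of the loop is skipped
  else
    match o with
    | none => st    -- board[r][c] raises in Python; excluded by Pre_
    | some num =>
      if num == "." then st
      else if PySem.Set.contains st.2 num then (true, st.2)
      else (st.1, PySem.Set.add st.2 num)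

def findDuplicateIn3x3 (board : List (List String)) (row_begin : Int) (col_begin : Int) : Bool :=
  ((PySem.List.pyRange row_begin (row_begin + 3) 1).foldl
    (fun st row_idx =>
      (PySem.List.pyRange col_begin (col_begin + 3) 1).foldl
        (fun st col_idx =>
          pvStepA st ((PySem.List.pyGet? board row_idx).bind
                        (fun row => PySem.List.pyGet? row col_idx)))
        st)
    (false, PySem.Set.empty)).1

-- ===== PORT B =====
-- has_pair: recursion on the cell list; 'head != "." and head in tail' compares the head
-- against every later cell (a none cell = IndexError in the comprehension, excluded by Pre_)
def pvHasPair : List (Option String) → Bool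
  | [] => false
  | head :: tail => (decide (head ≠ some ".") && tail.contains head) || pvHasPair tail

def findDuplicateIn3x3_alt (board : List (List String)) (row_begin : Int) (col_begin : Int) : Bool :=
  let cells := (PySem.List.pyRange 0 3 1).flatMap
    (fun r => (PySem.List.pyRange 0 3 1).map
      (fun c => (PySem.List.pyGet? board (row_begin + r)).bind
                  (fun row => PySem.List.pyGet? row (col_begin + c))))
  pvHasPair cells

-- ===== PRECONDITION & SPEC =====
-- Pre_ excludes exactly the inputs on which Python raises IndexError somewhere in the 3x3 block:
-- A may still return True early on some of those (duplicate found before the bad index), B raises there.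
def Pre_findDuplicateIn3x3 (board : List (List String)) (row_begin : Int) (col_begin : Int) : Prop :=
  ∀ r ∈ PySem.List.pyRange row_begin (row_begin + 3) 1,
    ∀ c ∈ PySem.List.pyRange col_begin (col_begin + 3) 1,
      ((PySem.List.pyGet? board r).bind (fun row => PySem.List.pyGet? row c)).isSome
instance (board : List (List String)) (row_begin : Int) (col_begin : Int) : Decidable (Pre_findDuplicateIn3x3 board row_begin col_begin) := by unfold Pre_findDuplicateIn3x3; infer_instance

def pvWitness_findDuplicateIn3x3 : List (List String) × Int × Int :=
  ([["5", ".", "3"], [".", "5", "."], ["1", "2", "."]], 0, 0)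

def Spec_findDuplicateIn3x3 (board : List (List String)) (row_begin : Int) (col_begin : Int) (out : Bool) : Prop := out = findDuplicateIn3x3_alt board row_begin col_begin
instance (board : List (List String)) (row_begin : Int) (col_begin : Int) (out : Bool) : Decidable (Spec_findDuplicateIn3x3 board row_begin col_begin out) := by unfold Spec_findDuplicateIn3x3; infer_instance

-- ===== CLAIM (what is proved, stated in full; the proofs are below) =====
def Claim_equal_findDuplicateIn3x3 : Prop := ∀ (board : List (List String)) (row_begin : Int) (col_begin : Int), Dom_findDuplicateIn3x3 board row_begin col_begin → Pre_findDuplicateIn3x3 board row_begin col_begin → Spec_findDuplicateIn3x3 board row_begin col_begin (findDuplicateIn3x3 board row_begin col_begin)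

-- ===== LEMMAS AND PROOFS =====

-- cell filter: what a value contributes to the non-'.' value list
def pvFiltB (o : Option String) : Option String :=
  match o with
  | none => none
  | some v => if v == "." then none else some v

-- the filtered values of a list of cells
def pvVals (os : List (Option String)) : List String := os.filterMap pvFiltB

-- A's nested fold over rows/cols is the fold of pvStepA over the row-major cell list
theorem pvA_flatten (rows cols : List Int) (f : Int → Int → Option String)
    (init : Bool × PySem.Set String) :
    rows.foldl (fun st r => cols.foldl (fun st c => pvStepA st (f r c)) st) init
      = (rows.flatMap (fun r => cols.map (f r))).foldl pvStepA init := by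
  induction rows generalizing init with
  | nil => rfl
  | cons r rs ih =>
      simp only [List.foldl_cons, List.flatMap_cons, List.foldl_append, ih, List.foldl_map]

-- once the Python has returned True, the rest of the loop changes nothing
theorem pvStepA_true (os : List (Option String)) (s : PySem.Set String) :
    os.foldl pvStepA (true, s) = (true, s) := by
  induction os with
  | nil => rfl
  | cons o os ih => simpa [pvStepA] using ih

-- loop invariant for A: flag ends true iff the remaining values repeat or hit the set already built
theorem pvA_invariant (os : List (Option String)) (s : PySem.Set String) :
    (os.foldl pvStepA (false, s)).1
      = decide (¬ ((pvVals os).Nodup ∧ ∀ v ∈ pvVals os, v ∉ s)) := by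
  induction os generalizing s with
  | nil => simp [pvVals]
  | cons o os ih =>
      rw [List.foldl_cons]
      cases o with
      | none =>
          have hstep : pvStepA (false, s) none = (false, s) := by simp [pvStepA]
          have hv : pvVals (none :: os) = pvVals os := by simp [pvVals, pvFiltB]
          rw [hstep, hv, ih s]
      | some v =>
        by_cases hdot : v = "."
        · have hstep : pvStepA (false, s) (some v) = (false, s) := by simp [pvStepA, hdot]
          have hv : pvVals (some v :: os) = pvVals os := by simp [pvVals, pvFiltB, hdot]
          rw [hstep, hv, ih s]
        · have hv : pvVals (some v :: os) = v :: pvVals os := by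
            simp [pvVals, pvFiltB, hdot]
          by_cases hmem : v ∈ s
          · have hstep : pvStepA (false, s) (some v) = (true, s) := by
              simp [pvStepA, hdot, hmem]
            rw [hstep, pvStepA_true, hv]
            have h : ¬ ((v :: pvVals os).Nodup ∧ ∀ u ∈ v :: pvVals os, u ∉ s) := by
              intro ⟨_, hall⟩
              exact hall v (List.mem_cons_self) hmem
            exact (decide_eq_true h).symm
          · have hstep : pvStepA (false, s) (some v) = (false, PySem.Set.add s v) := by
              simp [pvStepA, hdot, hmem]
            rw [hstep, ih (PySem.Set.add s v), hv]
            simp only [decide_eq_decide]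
            constructor
            · intro h hh
              obtain ⟨hnd, hall⟩ := hh
              rcases List.nodup_cons.mp hnd with ⟨hvnot, hnd2⟩
              exact h ⟨hnd2, fun u hu hus => by
                rcases (PySem.Set.mem_add s v u).mp hus with h1 | h2
                · exact hall u (List.mem_cons_of_mem _ hu) h1
                · exact hvnot (h2 ▸ hu)⟩
            · intro h hh
              obtain ⟨hnd, hall⟩ := hh
              refine h ⟨List.nodup_cons.mpr
                ⟨fun hv2 => hall v hv2 ((PySem.Set.mem_add s v v).mpr (Or.inr rfl)), hnd⟩,
                fun u hu hus => ?_⟩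
              rcases List.mem_cons.mp hu with rfl | hu2
              · exact hmem hus
              · exact hall u hu2 ((PySem.Set.mem_add s v u).mpr (Or.inl hus))

-- for a non-'.' value, membership among the filtered values is membership among the cells
theorem pvMem_vals (os : List (Option String)) (v : String) (hdot : v ≠ ".") :
    v ∈ pvVals os ↔ some v ∈ os := by
  simp only [pvVals, List.mem_filterMap]
  constructor
  · rintro ⟨o, ho, hf⟩
    cases o with
    | none => simp [pvFiltB] at hf
    | some u =>
        simp only [pvFiltB] at hf
        split at hf
        · exact absurd hf (by simp)
        · cases hf; exact ho
  · intro h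
    exact ⟨some v, h, by simp [pvFiltB, hdot]⟩

-- B's recursive pairwise check decides exactly "the filtered values repeat" (on IndexError-free cells)
theorem pvHasPair_eq (os : List (Option String)) (hs : ∀ o ∈ os, o.isSome) :
    pvHasPair os = decide (¬ (pvVals os).Nodup) := by
  induction os with
  | nil => simp [pvHasPair, pvVals]
  | cons o os ih =>
      obtain ⟨v, rfl⟩ := Option.isSome_iff_exists.mp (hs o List.mem_cons_self)
      have ih' := ih (fun o h => hs o (List.mem_cons_of_mem _ h))
      by_cases hdot : v = "."
      · subst hdot
        have hv : pvVals (some "." :: os) = pvVals os := by simp [pvVals, pvFiltB]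
        simp [pvHasPair, ih', hv]
      · have hv : pvVals (some v :: os) = v :: pvVals os := by simp [pvVals, pvFiltB, hdot]
        have hm : (some v ∈ os) ↔ v ∈ pvVals os := (pvMem_vals os v hdot).symm
        rw [pvHasPair, ih', hv]
        by_cases hmem : v ∈ pvVals os <;> by_cases hnd : (pvVals os).Nodup <;>
          simp [List.nodup_cons, hdot, hmem, hnd, hm]

-- the symbolic three-element range
theorem pvRange3 (a : Int) : PySem.List.pyRange a (a + 3) 1 = [a, a + 1, a + 2] := by
  rw [PySem.List.pyRange_one]
  have h3 : (a + 3 - a).toNat = 3 := by omega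
  rw [h3]
  simp [List.range_succ]

-- ===== VERDICT (by name: the statement is the Claim_ definition above) =====
theorem findDuplicateIn3x3_spec : Claim_equal_findDuplicateIn3x3 := by
  intro board rb cb _ hpre
  show findDuplicateIn3x3 board rb cb = findDuplicateIn3x3_alt board rb cb
  unfold findDuplicateIn3x3 findDuplicateIn3x3_alt
  rw [pvA_flatten, pvA_invariant]
  have h03 : PySem.List.pyRange 0 3 1 = [0, 1, 2] := by
    have := pvRange3 0; norm_num at this; exact this
  have hcells :
      (PySem.List.pyRange rb (rb + 3) 1).flatMap
        (fun r => (PySem.List.pyRange cb (cb + 3) 1).map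
          (fun c => (PySem.List.pyGet? board r).bind (fun row => PySem.List.pyGet? row c)))
      = (PySem.List.pyRange 0 3 1).flatMap
        (fun r => (PySem.List.pyRange 0 3 1).map
          (fun c => (PySem.List.pyGet? board (rb + r)).bind
                      (fun row => PySem.List.pyGet? row (cb + c)))) := by
    rw [pvRange3, pvRange3, h03]
    norm_num
  rw [hcells]
  rw [pvHasPair_eq]
  · simp [PySem.Set.empty]
  · intro o ho
    rw [h03] at ho
    simp only [List.flatMap_cons, List.flatMap_nil, List.map_cons, List.map_nil,
      List.append_nil, List.mem_append, List.mem_cons, List.not_mem_nil, or_false,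
      or_assoc] at ho
    rcases ho with rfl | rfl | rfl | rfl | rfl | rfl | rfl | rfl | rfl <;>
      exact hpre _ (by rw [PySem.List.mem_pyRange_one]; omega) _
        (by rw [PySem.List.mem_pyRange_one]; omega)
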